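-- pv_equiv track=rewrite | github.com/raeq/wordle_solver2 | src/modules/backend/solver/stateless_minimax_strategy.py | _build_prioritized_result
-- ===== SOURCE A (Python) =====
-- from typing import TYPE_CHECKING, List, Optional, Set, Tuple
--
-- def _build_prioritized_result(
--
--     scored_candidates: List[Tuple[str, int]],
--     possible_words: List[str],
--     common_words: List[str],
--     count: int,
--     prefer_common: bool = True,
-- ) -> List[str]:
--     """Build prioritized result favoring words that could be the answer."""
--     # Extract words from scored candidates
--     candidate_words = [word for word, _ in scored_candidates]
--
--     # Separate candidates that could be the answer vs. those that can't
--     possible_set = set(possible_words)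
--     possible_candidates = [w for w in candidate_words if w in possible_set]
--     impossible_candidates = [w for w in candidate_words if w not in possible_set]
--
--     # Within each group, apply common word preference if enabled
--     if prefer_common:
--         common_set = set(common_words)
--
--         # Split possible candidates
--         possible_common = [w for w in possible_candidates if w in common_set]
--         possible_other = [w for w in possible_candidates if w not in common_set]
--
--         # Split impossible candidates
--         impossible_common = [w for w in impossible_candidates if w in common_set]
--         impossible_other = [w for w in impossible_candidates if w not in common_set]
--
--         # Prioritize: possible common > possible other > impossible common > impossible other
--         result = (
--             possible_common + possible_other + impossible_common + impossible_other
--         )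
--     else:
--         # No common word preference
--         result = possible_candidates + impossible_candidates
--
--     return result[:count]
-- ===== SOURCE B (Python) =====
-- def _build_prioritized_result(
--     scored_candidates,
--     possible_words,
--     common_words,
--     count,
--     prefer_common=True,
-- ):
--     """One stable sort by a 4-way (or 2-way) priority rank instead of multiple filter passes."""
--     possible_set = set(possible_words)
--     common_set = set(common_words)
--
--     def rank(w):
--         if prefer_common:
--             if w in possible_set:
--                 return 0 if w in common_set else 1
--             return 2 if w in common_set else 3
--         return 0 if w in possible_set else 1
--
--     return sorted((w for w, _ in scored_candidates), key=rank)[:count]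
-- ===== Notes on version B (the rewrite author's own statement) =====
-- stated objective: alternative
-- what changed: Replaces the seven list-comprehension filter passes and concatenations by one integer priority rank per word plus a single stable sort with that rank as key, truncated to count.
import Mathlib
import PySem

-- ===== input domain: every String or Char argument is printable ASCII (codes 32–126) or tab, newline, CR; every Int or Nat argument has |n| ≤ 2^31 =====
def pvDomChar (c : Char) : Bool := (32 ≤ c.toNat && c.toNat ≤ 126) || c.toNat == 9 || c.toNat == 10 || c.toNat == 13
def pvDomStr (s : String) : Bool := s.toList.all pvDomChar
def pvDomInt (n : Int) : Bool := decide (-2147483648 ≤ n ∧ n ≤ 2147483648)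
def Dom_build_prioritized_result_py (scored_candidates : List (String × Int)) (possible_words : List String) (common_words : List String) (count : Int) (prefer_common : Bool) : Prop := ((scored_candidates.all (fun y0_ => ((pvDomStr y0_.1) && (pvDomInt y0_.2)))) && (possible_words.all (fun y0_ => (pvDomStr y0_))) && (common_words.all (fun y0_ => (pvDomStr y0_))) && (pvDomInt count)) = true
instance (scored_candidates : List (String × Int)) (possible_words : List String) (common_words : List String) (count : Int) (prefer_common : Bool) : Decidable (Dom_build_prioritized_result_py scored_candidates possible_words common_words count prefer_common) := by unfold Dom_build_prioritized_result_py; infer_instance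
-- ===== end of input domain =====

-- B replaces A's seven filter passes and concatenations by one priority rank per word
-- and a single stable sort over that rank (objective: alternative decomposition).

-- ===== PORT A =====
def build_prioritized_result_py (scored_candidates : List (String × Int)) (possible_words : List String) (common_words : List String) (count : Int) (prefer_common : Bool) : List String :=
  let candidate_words := scored_candidates.map (fun p => p.1)
  let possible_set : PySem.Set String := PySem.Set.ofList possible_words
  let possible_candidates := candidate_words.filter (fun w => PySem.Set.contains possible_set w)
  let impossible_candidates := candidate_words.filter (fun w => !PySem.Set.contains possible_set w)
  let result :=
    if prefer_common then
      let common_set : PySem.Set String := PySem.Set.ofList common_words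
      let possible_common := possible_candidates.filter (fun w => PySem.Set.contains common_set w)
      let possible_other := possible_candidates.filter (fun w => !PySem.Set.contains common_set w)
      let impossible_common := impossible_candidates.filter (fun w => PySem.Set.contains common_set w)
      let impossible_other := impossible_candidates.filter (fun w => !PySem.Set.contains common_set w)
      possible_common ++ possible_other ++ impossible_common ++ impossible_other
    else
      possible_candidates ++ impossible_candidates
  PySem.List.slice result none (some count)

-- ===== PORT B =====
def pvRank (possible_set common_set : PySem.Set String) (prefer_common : Bool) (w : String) : Int :=
  if prefer_common then
    if PySem.Set.contains possible_set w then
      (if PySem.Set.contains common_set w then 0 else 1)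
    else
      (if PySem.Set.contains common_set w then 2 else 3)
  else
    if PySem.Set.contains possible_set w then 0 else 1

def build_prioritized_result_py_alt (scored_candidates : List (String × Int)) (possible_words : List String) (common_words : List String) (count : Int) (prefer_common : Bool) : List String :=
  let possible_set : PySem.Set String := PySem.Set.ofList possible_words
  let common_set : PySem.Set String := PySem.Set.ofList common_words
  PySem.List.slice
    (PySem.List.sorted (scored_candidates.map (fun p => p.1)) (pvRank possible_set common_set prefer_common) false)
    none (some count)

-- ===== PRECONDITION & SPEC =====
def Spec_build_prioritized_result_py (scored_candidates : List (String × Int)) (possible_words : List String) (common_words : List String) (count : Int) (prefer_common : Bool) (out : List String) : Prop := out = build_prioritized_result_py_alt scored_candidates possible_words common_words count prefer_common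
instance (scored_candidates : List (String × Int)) (possible_words : List String) (common_words : List String) (count : Int) (prefer_common : Bool) (out : List String) : Decidable (Spec_build_prioritized_result_py scored_candidates possible_words common_words count prefer_common out) := by unfold Spec_build_prioritized_result_py; infer_instance

-- ===== CLAIM (what is proved, stated in full; the proofs are below) =====
def Claim_equal_build_prioritized_result_py : Prop := ∀ (scored_candidates : List (String × Int)) (possible_words : List String) (common_words : List String) (count : Int) (prefer_common : Bool), Dom_build_prioritized_result_py scored_candidates possible_words common_words count prefer_common → Spec_build_prioritized_result_py scored_candidates possible_words common_words count prefer_common (build_prioritized_result_py scored_candidates possible_words common_words count prefer_common)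

-- ===== LEMMAS AND PROOFS =====

-- insertBy walks past a prefix it does not go before
lemma insertBy_append_notBefore {α : Type} (before : α → α → Bool) (x : α) (as bs : List α)
    (h : ∀ a ∈ as, before x a = false) :
    PySem.List.insertBy before x (as ++ bs) = as ++ PySem.List.insertBy before x bs := by
  induction as with
  | nil => simp
  | cons a as ih =>
    have ha : before x a = false := h a (by simp)
    simp [PySem.List.insertBy, ha, ih (fun a ha' => h a (by simp [ha']))]

-- insertBy goes to the front when it goes before every element
lemma insertBy_all_before {α : Type} (before : α → α → Bool) (x : α) (bs : List α)
    (h : ∀ b ∈ bs, before x b = true) :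
    PySem.List.insertBy before x bs = x :: bs := by
  cases bs with
  | nil => simp [PySem.List.insertBy]
  | cons b bs => simp [PySem.List.insertBy, h b (by simp)]

-- a stable insertion lands exactly between the kept prefix and the pushed-back suffix
lemma insertBy_mid {α : Type} (before : α → α → Bool) (x : α) (as bs : List α)
    (h1 : ∀ a ∈ as, before x a = false) (h2 : ∀ b ∈ bs, before x b = true) :
    PySem.List.insertBy before x (as ++ bs) = as ++ x :: bs := by
  rw [insertBy_append_notBefore _ _ _ _ h1, insertBy_all_before _ _ _ h2]

lemma sorted_append_singleton {α : Type} (xs : List α) (x : α) (key : α → Int) :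
    PySem.List.sorted (xs ++ [x]) key false =
      PySem.List.insertBy (fun a b => decide (key a < key b)) x (PySem.List.sorted xs key false) := by
  simp [PySem.List.sorted, List.foldl_append]

-- a stable sort by a rank in {0,1,2,3} is the concatenation of the four rank buckets
lemma sorted_eq_filter_buckets {α : Type} (xs : List α) (key : α → Int)
    (h : ∀ x ∈ xs, key x = 0 ∨ key x = 1 ∨ key x = 2 ∨ key x = 3) :
    PySem.List.sorted xs key false =
      xs.filter (fun a => key a == 0) ++ xs.filter (fun a => key a == 1) ++
      xs.filter (fun a => key a == 2) ++ xs.filter (fun a => key a == 3) := by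
  induction xs using List.reverseRecOn with
  | nil => simp [PySem.List.sorted]
  | append_singleton xs x ih =>
    have hx := h x (by simp)
    have hxs : ∀ y ∈ xs, key y = 0 ∨ key y = 1 ∨ key y = 2 ∨ key y = 3 :=
      fun y hy => h y (by simp [hy])
    rw [sorted_append_singleton, ih hxs]
    have hmem : ∀ (i : Int) (a : α), a ∈ xs.filter (fun a => key a == i) → key a = i := by
      intro i a ha
      simpa using (List.of_mem_filter ha)
    rcases hx with hr | hr | hr | hr
    · rw [show xs.filter (fun a => key a == 0) ++ xs.filter (fun a => key a == 1) ++
            xs.filter (fun a => key a == 2) ++ xs.filter (fun a => key a == 3)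
          = xs.filter (fun a => key a == 0) ++ (xs.filter (fun a => key a == 1) ++
            xs.filter (fun a => key a == 2) ++ xs.filter (fun a => key a == 3)) by simp]
      rw [insertBy_mid _ _ _ _ ?_ ?_]
      · simp [List.filter_append, hr]
      · intro a ha; have := hmem 0 a ha; simp [hr, this]
      · intro b hb
        simp only [List.mem_append] at hb
        rcases hb with (hb | hb) | hb
        · have := hmem 1 b hb; simp [hr, this]
        · have := hmem 2 b hb; simp [hr, this]
        · have := hmem 3 b hb; simp [hr, this]
    · rw [show xs.filter (fun a => key a == 0) ++ xs.filter (fun a => key a == 1) ++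
            xs.filter (fun a => key a == 2) ++ xs.filter (fun a => key a == 3)
          = (xs.filter (fun a => key a == 0) ++ xs.filter (fun a => key a == 1)) ++
            (xs.filter (fun a => key a == 2) ++ xs.filter (fun a => key a == 3)) by simp]
      rw [insertBy_mid _ _ _ _ ?_ ?_]
      · simp [List.filter_append, hr]
      · intro a ha
        simp only [List.mem_append] at ha
        rcases ha with ha | ha
        · have := hmem 0 a ha; simp [hr, this]
        · have := hmem 1 a ha; simp [hr, this]
      · intro b hb
        simp only [List.mem_append] at hb
        rcases hb with hb | hb
        · have := hmem 2 b hb; simp [hr, this]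
        · have := hmem 3 b hb; simp [hr, this]
    · rw [show xs.filter (fun a => key a == 0) ++ xs.filter (fun a => key a == 1) ++
            xs.filter (fun a => key a == 2) ++ xs.filter (fun a => key a == 3)
          = (xs.filter (fun a => key a == 0) ++ xs.filter (fun a => key a == 1) ++
            xs.filter (fun a => key a == 2)) ++ xs.filter (fun a => key a == 3) by simp]
      rw [insertBy_mid _ _ _ _ ?_ ?_]
      · simp [List.filter_append, hr]
      · intro a ha
        simp only [List.mem_append] at ha
        rcases ha with (ha | ha) | ha
        · have := hmem 0 a ha; simp [hr, this]
        · have := hmem 1 a ha; simp [hr, this]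
        · have := hmem 2 a ha; simp [hr, this]
      · intro b hb; have := hmem 3 b hb; simp [hr, this]
    · rw [insertBy_append_notBefore _ _ (xs.filter (fun a => key a == 0) ++
            xs.filter (fun a => key a == 1) ++ xs.filter (fun a => key a == 2)) _ ?_]
      · rw [PySem.List.insertBy_of_forall_not_before _ _ _ ?_]
        · simp [List.filter_append, hr]
        · intro a ha; have := hmem 3 a ha; simp [hr, this]
      · intro a ha
        simp only [List.mem_append] at ha
        rcases ha with (ha | ha) | ha
        · have := hmem 0 a ha; simp [hr, this]
        · have := hmem 1 a ha; simp [hr, this]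
        · have := hmem 2 a ha; simp [hr, this]

lemma rank_mem (ps cs : PySem.Set String) (pc : Bool) :
    ∀ w, pvRank ps cs pc w = 0 ∨ pvRank ps cs pc w = 1 ∨ pvRank ps cs pc w = 2 ∨ pvRank ps cs pc w = 3 := by
  intro w
  unfold pvRank
  split_ifs <;> simp

theorem build_prioritized_result_py_spec : Claim_equal_build_prioritized_result_py := by
  intro sc pw cw count pc _
  unfold Spec_build_prioritized_result_py
  unfold build_prioritized_result_py build_prioritized_result_py_alt
  set ws := sc.map (fun p => p.1) with hws
  set ps : PySem.Set String := PySem.Set.ofList pw with hps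
  set cs : PySem.Set String := PySem.Set.ofList cw with hcs
  dsimp only
  congr 1
  rw [sorted_eq_filter_buckets _ _ (fun w _ => rank_mem ps cs pc w)]
  cases pc with
  | true =>
    have e0 : (ws.filter (fun w => PySem.Set.contains ps w)).filter (fun w => PySem.Set.contains cs w)
        = ws.filter (fun a => pvRank ps cs true a == 0) := by
      rw [List.filter_filter]; apply List.filter_congr; intro w _
      by_cases h1 : w ∈ (ps : List String) <;> by_cases h2 : w ∈ (cs : List String) <;>
        simp [pvRank, h1, h2]
    have e1 : (ws.filter (fun w => PySem.Set.contains ps w)).filter (fun w => !PySem.Set.contains cs w)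
        = ws.filter (fun a => pvRank ps cs true a == 1) := by
      rw [List.filter_filter]; apply List.filter_congr; intro w _
      by_cases h1 : w ∈ (ps : List String) <;> by_cases h2 : w ∈ (cs : List String) <;>
        simp [pvRank, h1, h2]
    have e2 : (ws.filter (fun w => !PySem.Set.contains ps w)).filter (fun w => PySem.Set.contains cs w)
        = ws.filter (fun a => pvRank ps cs true a == 2) := by
      rw [List.filter_filter]; apply List.filter_congr; intro w _
      by_cases h1 : w ∈ (ps : List String) <;> by_cases h2 : w ∈ (cs : List String) <;>
        simp [pvRank, h1, h2]
    have e3 : (ws.filter (fun w => !PySem.Set.contains ps w)).filter (fun w => !PySem.Set.contains cs w)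
        = ws.filter (fun a => pvRank ps cs true a == 3) := by
      rw [List.filter_filter]; apply List.filter_congr; intro w _
      by_cases h1 : w ∈ (ps : List String) <;> by_cases h2 : w ∈ (cs : List String) <;>
        simp [pvRank, h1, h2]
    simp only [e0, e1, e2, e3]
    simp
  | false =>
    have e2 : ws.filter (fun a => pvRank ps cs false a == 2) = [] := by
      rw [List.filter_eq_nil_iff]; intro a _
      by_cases h1 : a ∈ (ps : List String) <;> simp [pvRank, h1]
    have e3 : ws.filter (fun a => pvRank ps cs false a == 3) = [] := by
      rw [List.filter_eq_nil_iff]; intro a _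
      by_cases h1 : a ∈ (ps : List String) <;> simp [pvRank, h1]
    have e0 : ws.filter (fun w => PySem.Set.contains ps w)
        = ws.filter (fun a => pvRank ps cs false a == 0) := by
      apply List.filter_congr; intro w _
      by_cases h1 : w ∈ (ps : List String) <;> simp [pvRank, h1]
    have e1 : ws.filter (fun w => !PySem.Set.contains ps w)
        = ws.filter (fun a => pvRank ps cs false a == 1) := by
      apply List.filter_congr; intro w _
      by_cases h1 : w ∈ (ps : List String) <;> simp [pvRank, h1]
    simp only [e0, e1, e2, e3]
    simp
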